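-- pv_equiv track=rewrite | github.com/Nicolas-Richard/Programming-Interviews-Problems | The Algorithm Design Manual/graph2.py | DFTraversal_it
-- ===== SOURCE A (Python) =====
-- def DFTraversal_it(graph, startingnode):
--
--     stack=[startingnode]
--     visited=set()
--
--     while len(stack) >0:
--         node=stack.pop()
--         if node not in visited:
--             for n in graph[node]:
--                 stack.append(n)
--             visited.add(node)
--
--     return visited
-- ===== SOURCE B (Python) =====
-- def DFTraversal_it(graph, startingnode):
--     # Recursive depth-first traversal; graph[node] is read at first visit so a
--     # missing key raises KeyError on exactly the same inputs as the iterative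
--     # version.  Neighbours are recursed into last-first (reversed), which makes
--     # the first-visit order identical to A's pop order (the SET is the same
--     # regardless).
--     visited = set()
--
--     def visit(node):
--         if node in visited:
--             return
--         neighbours = graph[node]
--         visited.add(node)
--         for n in reversed(neighbours):
--             visit(n)
--
--     visit(startingnode)
--     return visited
-- ===== Notes on version B (the rewrite author's own statement) =====
-- stated objective: alternative
-- what changed: A's iterative DFS with an explicit worklist stack that may hold duplicates and re-checks visited at pop time is replaced by a recursive DFS (visit marks the node, then recurses into unvisited neighbours); the Lean port of B is a fuel-indexed structural recursion, while A's port is a well-founded while-loop over the stack.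
import Mathlib
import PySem

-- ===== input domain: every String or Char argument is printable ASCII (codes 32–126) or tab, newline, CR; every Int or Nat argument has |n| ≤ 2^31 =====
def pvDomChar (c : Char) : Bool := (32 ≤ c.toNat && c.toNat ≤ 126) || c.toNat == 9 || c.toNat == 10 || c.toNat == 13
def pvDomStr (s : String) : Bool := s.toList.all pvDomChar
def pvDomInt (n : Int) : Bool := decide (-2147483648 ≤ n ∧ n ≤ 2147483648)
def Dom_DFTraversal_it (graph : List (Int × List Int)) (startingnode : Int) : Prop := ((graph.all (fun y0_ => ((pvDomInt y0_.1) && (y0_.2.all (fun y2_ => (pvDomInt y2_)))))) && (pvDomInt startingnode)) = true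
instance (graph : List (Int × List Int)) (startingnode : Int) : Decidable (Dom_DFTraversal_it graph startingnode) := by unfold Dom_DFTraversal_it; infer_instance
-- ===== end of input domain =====

-- B replaces A's explicit-stack DFS (duplicates on the stack, visited re-checked at pop) by a
-- recursive DFS marking each node before descending into unvisited neighbours; same visited
-- set, same KeyError inputs (both excluded by Pre_). Objective: alternative decomposition.

-- Termination measure for port A: number of graph keys not yet visited.
def pvUnvisited (graph : List (Int × List Int)) (visited : PySem.Set Int) : Nat :=
  ((graph.map Prod.fst).filter (fun k => decide (k ∉ visited))).length

theorem pvLenFilter_le {p q : Int → Bool} (h : ∀ a, q a = true → p a = true) :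
    ∀ l : List Int, (l.filter q).length ≤ (l.filter p).length := by
  intro l
  induction l with
  | nil => simp
  | cons a l ih =>
    simp only [List.filter_cons]
    cases hq : q a
    · cases hp : p a <;> simp <;> omega
    · rw [h a hq]; simp; omega

theorem pvLenFilter_lt {p q : Int → Bool} (h : ∀ a, q a = true → p a = true) (n : Int)
    (hp : p n = true) (hq : q n = false) :
    ∀ l : List Int, n ∈ l → (l.filter q).length < (l.filter p).length := by
  intro l hn
  induction l with
  | nil => cases hn
  | cons a l ih =>
    simp only [List.filter_cons]
    rcases List.mem_cons.1 hn with rfl | hl'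
    · rw [hp, hq]
      simp
      exact pvLenFilter_le h l
    · have h2 := ih hl'
      cases hq' : q a
      · cases hp' : p a <;> simp <;> omega
      · rw [h a hq']; simp; omega

theorem pvFilter_add_lt (l : List Int) (v : PySem.Set Int) (n : Int)
    (hl : n ∈ l) (hv : n ∉ v) :
    (l.filter (fun k => decide (k ∉ PySem.Set.add v n))).length <
      (l.filter (fun k => decide (k ∉ v))).length := by
  apply pvLenFilter_lt (p := fun k => decide (k ∉ v)) _ n _ _ l hl
  · intro a ha
    simp only [decide_eq_true_eq] at *
    exact fun hav => ha ((PySem.Set.mem_add _ _ _).2 (Or.inl hav))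
  · simpa using hv
  · simp only [decide_eq_false_iff_not, not_not]
    exact (PySem.Set.mem_add _ _ _).2 (Or.inr rfl)

theorem pvMemKeys_of_get? (graph : List (Int × List Int)) (n : Int) (nbrs : List Int)
    (h : (PySem.Dict.mk graph).get? n = some nbrs) : n ∈ graph.map Prod.fst := by
  by_contra hn
  have hnone : (PySem.Dict.mk graph).get? n = none := by
    rw [PySem.Dict.get?_eq_none_iff_not_mem_keys]
    simpa [PySem.Dict.keys_mk] using hn
  rw [hnone] at h; cases h

-- ===== PORT A =====
-- A's while loop; the stack is kept top-first (Python appends then pops at the END, so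
-- pushing graph[node]'s elements in order is 'nbrs.reverse ++ rest'); 'none' = KeyError.
def DFTraversal_itLoop (graph : List (Int × List Int)) (stack : List Int)
    (visited : PySem.Set Int) : Option (PySem.Set Int) :=
  match stack with
  | [] => some visited
  | node :: rest =>
    if node ∈ visited then DFTraversal_itLoop graph rest visited
    else
      match hg : (PySem.Dict.mk graph).get? node with
      | none => none
      | some nbrs => DFTraversal_itLoop graph (nbrs.reverse ++ rest) (PySem.Set.add visited node)
termination_by (pvUnvisited graph visited, stack.length)
decreasing_by
  · exact Prod.Lex.right _ (Nat.lt_succ_self _)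
  · exact Prod.Lex.left _ _
      (pvFilter_add_lt _ _ _ (pvMemKeys_of_get? graph node nbrs hg) (by assumption))

def DFTraversal_it (graph : List (Int × List Int)) (startingnode : Int) : List Int :=
  match DFTraversal_itLoop graph [startingnode] PySem.Set.empty with
  | some visited => visited
  | none => []  -- Python raises KeyError here; excluded by Pre_

-- ===== PORT B =====
-- Source B's recursive 'visit' (pvVisitFuel) and its 'for n in reversed(neighbours)' body
-- (pvForFuel), ported as a fuel-indexed structural recursion; 'none' = KeyError.
-- Fuel graph.length + 1 exceeds the number of keys, so it never runs out (see the lemmas).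
mutual
def pvVisitFuel (graph : List (Int × List Int)) : Nat → Int → PySem.Set Int → Option (PySem.Set Int)
  | 0, _, _ => none
  | fuel + 1, node, visited =>
    if node ∈ visited then some visited
    else
      match (PySem.Dict.mk graph).get? node with
      | none => none
      | some neighbours => pvForFuel graph fuel neighbours.reverse (PySem.Set.add visited node)
termination_by fuel _ _ => (fuel, 0)

def pvForFuel (graph : List (Int × List Int)) : Nat → List Int → PySem.Set Int → Option (PySem.Set Int)
  | _, [], visited => some visited
  | fuel, n :: ns, visited =>
    match pvVisitFuel graph fuel n visited with
    | none => none
    | some visited' => pvForFuel graph fuel ns visited'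
termination_by fuel ns _ => (fuel, ns.length + 1)
end

def DFTraversal_it_alt (graph : List (Int × List Int)) (startingnode : Int) : List Int :=
  match pvVisitFuel graph (graph.length + 1) startingnode PySem.Set.empty with
  | some visited => visited
  | none => []  -- Python raises KeyError here; excluded by Pre_

-- ===== PRECONDITION & SPEC =====
-- Pre_ = exactly the inputs on which the Python A returns (no KeyError): every node reachable
-- from startingnode (following the adjacency lists of present keys) is itself a key.
-- pvReach is the standard saturation of the reachable set, not either port's traversal.
def pvAdj (graph : List (Int × List Int)) (n : Int) : List Int :=
  (PySem.Dict.mk graph).getD n []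

-- One saturation layer: (seen, frontier) ↦ (seen ∪ neighbours of frontier, the new nodes).
def pvExpand (graph : List (Int × List Int)) (p : PySem.Set Int × List Int) :
    PySem.Set Int × List Int :=
  p.2.foldl (fun acc n =>
      (pvAdj graph n).foldl
        (fun acc2 m => if m ∈ acc2.1 then acc2 else (PySem.Set.add acc2.1 m, acc2.2 ++ [m]))
        acc)
    (p.1, [])

-- graph.length.succ layers saturate: a layer only grows through nodes that are keys.
def pvReach (graph : List (Int × List Int)) (startingnode : Int) : PySem.Set Int :=
  ((pvExpand graph)^[graph.length.succ] (PySem.Set.ofList [startingnode], [startingnode])).1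

def Pre_DFTraversal_it (graph : List (Int × List Int)) (startingnode : Int) : Prop :=
  ∀ n ∈ pvReach graph startingnode, n ∈ graph.map Prod.fst
instance (graph : List (Int × List Int)) (startingnode : Int) : Decidable (Pre_DFTraversal_it graph startingnode) := by unfold Pre_DFTraversal_it; infer_instance

def pvWitness_DFTraversal_it : (List (Int × List Int)) × Int := ([(0, [1]), (1, [0, 1])], 0)

def Spec_DFTraversal_it (graph : List (Int × List Int)) (startingnode : Int) (out : List Int) : Prop := out = DFTraversal_it_alt graph startingnode
instance (graph : List (Int × List Int)) (startingnode : Int) (out : List Int) : Decidable (Spec_DFTraversal_it graph startingnode out) := by unfold Spec_DFTraversal_it; infer_instance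

-- ===== CLAIM (what is proved, stated in full; the proofs are below) =====
def Claim_equal_DFTraversal_it : Prop := ∀ (graph : List (Int × List Int)) (startingnode : Int), Dom_DFTraversal_it graph startingnode → Pre_DFTraversal_it graph startingnode → Spec_DFTraversal_it graph startingnode (DFTraversal_it graph startingnode)

-- ===== LEMMAS AND PROOFS =====

theorem pvFilter_add_le (l : List Int) (v : PySem.Set Int) (n : Int) :
    (l.filter (fun k => decide (k ∉ PySem.Set.add v n))).length ≤
      (l.filter (fun k => decide (k ∉ v))).length := by
  apply pvLenFilter_le
  intro a ha
  simp only [decide_eq_true_eq] at *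
  exact fun hav => ha ((PySem.Set.mem_add _ _ _).2 (Or.inl hav))

-- Unfolding lemmas for A's loop (its dependent match blocks direct rewriting).
theorem pvLoop_nil (graph : List (Int × List Int)) (v : PySem.Set Int) :
    DFTraversal_itLoop graph [] v = some v := by
  rw [DFTraversal_itLoop.eq_def]

theorem pvLoop_cons_mem (graph : List (Int × List Int)) (node : Int) (rest : List Int)
    (v : PySem.Set Int) (hmem : node ∈ v) :
    DFTraversal_itLoop graph (node :: rest) v = DFTraversal_itLoop graph rest v := by
  rw [DFTraversal_itLoop.eq_def]; simp [hmem]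

theorem pvLoop_cons_none (graph : List (Int × List Int)) (node : Int) (rest : List Int)
    (v : PySem.Set Int) (hmem : node ∉ v) (hg : (PySem.Dict.mk graph).get? node = none) :
    DFTraversal_itLoop graph (node :: rest) v = none := by
  rw [DFTraversal_itLoop.eq_def]; simp only [if_neg hmem]; split <;> simp_all

theorem pvLoop_cons_some (graph : List (Int × List Int)) (node : Int) (rest : List Int)
    (v : PySem.Set Int) (nbrs : List Int) (hmem : node ∉ v)
    (hg : (PySem.Dict.mk graph).get? node = some nbrs) :
    DFTraversal_itLoop graph (node :: rest) v =
      DFTraversal_itLoop graph (nbrs.reverse ++ rest) (PySem.Set.add v node) := by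
  rw [DFTraversal_itLoop.eq_def]; simp only [if_neg hmem]; split <;> simp_all

-- A's loop on a concatenated stack: the front part is fully drained before the back part.
theorem pvLoop_append (graph : List (Int × List Int)) (xs ys : List Int) (v : PySem.Set Int) :
    DFTraversal_itLoop graph (xs ++ ys) v =
      match DFTraversal_itLoop graph xs v with
      | none => none
      | some w => DFTraversal_itLoop graph ys w := by
  fun_induction DFTraversal_itLoop graph xs v with
  | case1 v => simp
  | case2 v node rest hmem ih =>
    rw [List.cons_append, pvLoop_cons_mem graph node (rest ++ ys) v hmem]
    exact ih
  | case3 v node rest hmem hg =>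
    rw [List.cons_append, pvLoop_cons_none graph node (rest ++ ys) v hmem hg]
  | case4 v node rest hmem nbrs hg ih =>
    rw [List.cons_append, pvLoop_cons_some graph node (rest ++ ys) v nbrs hmem hg, ← List.append_assoc]
    exact ih

-- Running A's loop never grows the count of unvisited keys.
theorem pvLoop_shrink (graph : List (Int × List Int)) (xs : List Int) (v w : PySem.Set Int)
    (h : DFTraversal_itLoop graph xs v = some w) :
    pvUnvisited graph w ≤ pvUnvisited graph v := by
  fun_induction DFTraversal_itLoop graph xs v with
  | case1 v => cases h; exact Nat.le_refl _
  | case2 v node rest hmem ih => exact ih h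
  | case3 v node rest hmem hg => cases h
  | case4 v node rest hmem nbrs hg ih =>
    exact Nat.le_trans (ih h) (pvFilter_add_le _ _ _)

-- A's stack loop equals B's fuelled for-recursion once the fuel exceeds the unvisited keys.
theorem pvLoop_eq_forFuel (graph : List (Int × List Int)) :
    ∀ (fuel : Nat) (xs : List Int) (v : PySem.Set Int), pvUnvisited graph v < fuel →
      DFTraversal_itLoop graph xs v = pvForFuel graph fuel xs v := by
  intro fuel
  induction fuel with
  | zero => intro xs v h; omega
  | succ f ihf =>
    intro xs
    induction xs with
    | nil => intro v h; rw [pvLoop_nil, pvForFuel]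
    | cons node rest ihs =>
      intro v h
      rw [pvForFuel, pvVisitFuel]
      by_cases hmem : node ∈ v
      · rw [pvLoop_cons_mem graph node rest v hmem]
        simp only [if_pos hmem]
        exact ihs v h
      · simp only [if_neg hmem]
        cases hg : (PySem.Dict.mk graph).get? node with
        | none => rw [pvLoop_cons_none graph node rest v hmem hg]
        | some nbrs =>
          rw [pvLoop_cons_some graph node rest v nbrs hmem hg]
          simp only
          have hlt : pvUnvisited graph (PySem.Set.add v node) < pvUnvisited graph v :=
            pvFilter_add_lt _ _ _ (pvMemKeys_of_get? graph node nbrs hg) hmem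
          rw [pvLoop_append]
          rw [ihf nbrs.reverse (PySem.Set.add v node) (by omega)]
          cases hx : pvForFuel graph f nbrs.reverse (PySem.Set.add v node) with
          | none => simp
          | some w =>
            simp only
            have hl : DFTraversal_itLoop graph nbrs.reverse (PySem.Set.add v node) = some w := by
              rw [ihf nbrs.reverse (PySem.Set.add v node) (by omega)]; exact hx
            have hw := pvLoop_shrink graph nbrs.reverse (PySem.Set.add v node) w hl
            exact ihs w (by omega)

theorem pvUnvisited_empty (graph : List (Int × List Int)) :
    pvUnvisited graph PySem.Set.empty = graph.length := by
  simp [pvUnvisited, PySem.Set.empty, List.filter_eq_self.2]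

-- ===== VERDICT (by name: the statement is the Claim_ definition above) =====
theorem DFTraversal_it_spec : Claim_equal_DFTraversal_it := by
  intro graph startingnode _ _
  unfold Spec_DFTraversal_it DFTraversal_it DFTraversal_it_alt
  have h := pvLoop_eq_forFuel graph (graph.length + 1) [startingnode] PySem.Set.empty
    (by rw [pvUnvisited_empty]; omega)
  rw [h, pvForFuel]
  cases hv : pvVisitFuel graph (graph.length + 1) startingnode PySem.Set.empty with
  | none => simp
  | some w => simp [pvForFuel]
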